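-- pv_equiv track=rewrite | github.com/lumiere0123/practice_C | PYTHON_CSC108/git/lecture/wk9/nov2_nov8/repeat_word.py | repeat_vowels
-- ===== SOURCE A (Python) =====
-- def repeat_vowels(word, repeat_count):
--     ''' (str, int) -> str
--     Return word with the vowels repeated repeat_count times.
--
--     >>> repeat_vowels('cat', 5)
--     'caaaaat'
--     '''
--
--     repeated = ''
--     for ch in word:
--         if ch in 'aeiou':
--             repeated += ch * repeat_count
--         else:
--             repeated += ch
--     return repeated
-- ===== SOURCE B (Python) =====
-- def repeat_vowels(word, repeat_count):
--     # Staged rewriting: one full replace pass per vowel that occurs in the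
--     # word. Correct because the replacement text for vowel v consists only of
--     # v, so later passes (for other vowels) never touch text produced by
--     # earlier passes.
--     for v in 'aeiou':
--         if v in word:
--             word = word.replace(v, v * repeat_count)
--     return word
-- ===== Notes on version B (the rewrite author's own statement) =====
-- stated objective: simpler
-- what changed: B replaces A's single per-character branch-and-concatenate loop with staged whole-string rewrite passes, one str.replace per vowel present in the word; this is correct because each replacement text contains only its own vowel, so later passes never alter earlier output.
import Mathlib
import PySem

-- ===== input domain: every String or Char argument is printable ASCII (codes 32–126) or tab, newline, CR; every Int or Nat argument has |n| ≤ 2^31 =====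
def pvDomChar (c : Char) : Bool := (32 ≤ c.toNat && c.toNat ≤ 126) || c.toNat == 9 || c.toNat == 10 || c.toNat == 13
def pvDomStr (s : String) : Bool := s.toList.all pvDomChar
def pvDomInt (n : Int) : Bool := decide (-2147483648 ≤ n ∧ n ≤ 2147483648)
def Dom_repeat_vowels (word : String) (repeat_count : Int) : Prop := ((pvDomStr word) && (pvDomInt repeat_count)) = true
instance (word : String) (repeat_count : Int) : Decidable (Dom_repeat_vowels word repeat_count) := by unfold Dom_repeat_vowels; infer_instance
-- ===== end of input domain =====

-- B rewrites the whole string in five staged str.replace passes (one per vowel) instead of A's per-character branch loop; simpler.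

-- ===== PORT A =====
def repeat_vowels (word : String) (repeat_count : Int) : String :=
  String.ofList (word.toList.foldl
    (fun repeated ch =>
      if ch ∈ ['a', 'e', 'i', 'o', 'u'] then
        repeated ++ PySem.List.pyRepeat [ch] repeat_count
      else
        repeated ++ [ch])
    [])

-- ===== PORT B =====
-- for v in 'aeiou': if v in word: word = word.replace(v, v * repeat_count); return word
def repeat_vowels_alt (word : String) (repeat_count : Int) : String :=
  ['a', 'e', 'i', 'o', 'u'].foldl
    (fun w v =>
      if PySem.Str.isIn (String.ofList [v]) w then
        PySem.Str.replace w (String.ofList [v]) (String.ofList (PySem.List.pyRepeat [v] repeat_count))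
      else w)
    word

-- ===== PRECONDITION & SPEC =====
def Spec_repeat_vowels (word : String) (repeat_count : Int) (out : String) : Prop := out = repeat_vowels_alt word repeat_count
instance (word : String) (repeat_count : Int) (out : String) : Decidable (Spec_repeat_vowels word repeat_count out) := by unfold Spec_repeat_vowels; infer_instance

-- ===== CLAIM (what is proved, stated in full; the proofs are below) =====
def Claim_equal_repeat_vowels : Prop := ∀ (word : String) (repeat_count : Int), Dom_repeat_vowels word repeat_count → Spec_repeat_vowels word repeat_count (repeat_vowels word repeat_count)

-- ===== LEMMAS AND PROOFS =====

-- replace.go with a single-character pattern is a per-character flatMap (given enough fuel)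
lemma replace_go_single (v : Char) (new : List Char) :
    ∀ (fuel : Nat) (l acc : List Char), l.length ≤ fuel →
      PySem.Chars.replace.go [v] new fuel l acc
        = acc.reverse ++ l.flatMap (fun c => if c = v then new else [c]) := by
  intro fuel
  induction fuel with
  | zero =>
    intro l acc h
    have : l = [] := List.eq_nil_of_length_eq_zero (Nat.le_zero.mp h)
    subst this
    simp [PySem.Chars.replace.go]
  | succ n ih =>
    intro l acc h
    cases l with
    | nil => simp [PySem.Chars.replace.go]
    | cons c t =>
      simp only [PySem.Chars.replace.go]
      by_cases hc : c = v
      · subst hc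
        have hp : List.isPrefixOf [c] (c :: t) = true := by
          simp [List.isPrefixOf]
        rw [if_pos hp]
        have ht : t.length ≤ n := by simpa using h
        simp only [List.length_cons, List.length_nil, Nat.zero_add, List.drop_succ_cons,
          List.drop_zero]
        rw [ih _ _ ht]
        simp
      · rw [if_neg (by simp [List.isPrefixOf, Ne.symm hc])]
        have ht : t.length ≤ n := by simpa using h
        rw [ih _ _ ht]
        simp [hc]

lemma replace_single (v : Char) (new s : List Char) :
    PySem.Chars.replace s [v] new = s.flatMap (fun c => if c = v then new else [c]) := by
  unfold PySem.Chars.replace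
  rw [if_neg (by simp)]
  simpa using replace_go_single v new s.length s []

-- the combined effect of one replace pass per vowel in vs (vs without duplicates)
lemma foldl_replace_passes (k : Int) :
    ∀ (vs : List Char), vs.Nodup → ∀ (l : List Char),
      List.foldl (fun w v => w.flatMap (fun c => if c = v then PySem.List.pyRepeat [v] k else [c])) l vs
        = l.flatMap (fun c => if c ∈ vs then PySem.List.pyRepeat [c] k else [c]) := by
  intro vs
  induction vs with
  | nil => intro _ l; simp
  | cons v t ih =>
    intro hnd l
    have hvt : v ∉ t := (List.nodup_cons.mp hnd).1
    have hnt : t.Nodup := (List.nodup_cons.mp hnd).2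
    rw [List.foldl_cons, ih hnt, List.flatMap_assoc]
    refine List.flatMap_congr ?_
    intro c _
    by_cases hc : c = v
    · subst hc
      rw [if_pos rfl]
      have key : ∀ n : Nat, (List.replicate n c).flatMap
          (fun x => if x ∈ t then List.replicate k.toNat x else [x]) = List.replicate n c := by
        intro n
        induction n with
        | zero => simp
        | succ m ihm => simp [List.replicate_succ, ihm, hvt]
      simp only [PySem.List.pyRepeat_singleton]
      rw [key]
      simp
    · rw [if_neg hc]
      by_cases hm : c ∈ t <;> simp [hm, hc]

lemma isIn_single_iff (v : Char) (w : String) :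
    PySem.Str.isIn (String.ofList [v]) w = true ↔ v ∈ w.toList := by
  rw [← @String.ofList_toList w]
  simp [PySem.Chars.isIn_iff_infix, List.singleton_infix_iff]

-- A's accumulator loop is the same flatMap
lemma a_foldl_eq (k : Int) (l : List Char) :
    ∀ acc : List Char,
      List.foldl (fun repeated ch =>
          if ch ∈ ['a', 'e', 'i', 'o', 'u'] then repeated ++ PySem.List.pyRepeat [ch] k
          else repeated ++ [ch]) acc l
        = acc ++ l.flatMap (fun ch => if ch ∈ ['a', 'e', 'i', 'o', 'u'] then PySem.List.pyRepeat [ch] k else [ch]) := by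
  induction l with
  | nil => simp
  | cons c t ih =>
    intro acc
    rw [List.foldl_cons, ih, List.flatMap_cons]
    by_cases h : c ∈ ['a', 'e', 'i', 'o', 'u']
    · rw [if_pos h, if_pos h, List.append_assoc]
    · rw [if_neg h, if_neg h, List.append_assoc]

-- ===== VERDICT (by name: the statement is the Claim_ definition above) =====
theorem repeat_vowels_spec : Claim_equal_repeat_vowels := by
  intro word repeat_count _
  unfold Spec_repeat_vowels repeat_vowels repeat_vowels_alt
  have hb : ∀ (vs : List Char) (w : String),
      List.foldl (fun w v =>
          if PySem.Str.isIn (String.ofList [v]) w then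
            PySem.Str.replace w (String.ofList [v]) (String.ofList (PySem.List.pyRepeat [v] repeat_count))
          else w) w vs
        = String.ofList (List.foldl (fun l v => l.flatMap (fun c => if c = v then PySem.List.pyRepeat [v] repeat_count else [c])) w.toList vs) := by
    intro vs
    induction vs with
    | nil => intro w; simp
    | cons v t ih =>
      intro w
      have hrepl : (if PySem.Str.isIn (String.ofList [v]) w then
            PySem.Str.replace w (String.ofList [v]) (String.ofList (PySem.List.pyRepeat [v] repeat_count))
          else w)
          = String.ofList (w.toList.flatMap (fun c => if c = v then PySem.List.pyRepeat [v] repeat_count else [c])) := by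
        by_cases hm : v ∈ w.toList
        · rw [if_pos ((isIn_single_iff v w).mpr hm)]
          simp [PySem.Str.replace, replace_single]
        · rw [if_neg (fun h => hm ((isIn_single_iff v w).mp h))]
          have : w.toList.flatMap (fun c => if c = v then PySem.List.pyRepeat [v] repeat_count else [c])
              = w.toList := by
            have hcg : ∀ c ∈ w.toList,
                (if c = v then PySem.List.pyRepeat [v] repeat_count else [c]) = [c] := by
              intro c hc
              rw [if_neg (fun h : c = v => hm (h ▸ hc))]
            rw [List.flatMap_congr hcg, List.flatMap_singleton']
          rw [this, String.ofList_toList]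
      rw [List.foldl_cons, List.foldl_cons, hrepl, ih, String.toList_ofList]
  rw [hb]
  rw [a_foldl_eq, List.nil_append,
      foldl_replace_passes repeat_count ['a','e','i','o','u'] (by decide)]
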